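-- pv_equiv track=rewrite | github.com/commitizen-tools/commitizen | commitizen/commands/check.py | _filter_comments
-- ===== SOURCE A (Python) =====
-- def _filter_comments(msg: str) -> str:
--     """Filter the commit message by removing comments.
--
--     When using `git commit --verbose`, we exclude the diff that is going to
--     generated, like the following example:
--
--     ```bash
--     ...
--     # ------------------------ >8 ------------------------
--     # Do not modify or remove the line above.
--     # Everything below it will be ignored.
--     diff --git a/... b/...
--     ...
--     ```
--
--     Args:
--         msg: The commit message to filter.
--
--     Returns:
--         The filtered commit message without comments.
--     """
--
--     lines: list[str] = []
--     for line in msg.split("\n"):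
--         if "# ------------------------ >8 ------------------------" in line:
--             break
--         if not line.startswith("#"):
--             lines.append(line)
--     return "\n".join(lines)
-- ===== SOURCE B (Python) =====
-- _SCISSORS = "# ------------------------ >8 ------------------------"
--
-- def _filter_comments(msg: str) -> str:
--     # Right-to-left single pass: a scissors line wipes everything gathered
--     # to its right; kept lines are collected in reverse and flipped at the end.
--     kept = []
--     for line in reversed(msg.split("\n")):
--         if _SCISSORS in line:
--             kept.clear()
--         elif not line.startswith("#"):
--             kept.append(line)
--     return "\n".join(reversed(kept))
-- ===== Notes on version B (the rewrite author's own statement) =====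
-- stated objective: alternative
-- what changed: Replaces A's left-to-right loop that breaks at the scissors marker with a right-to-left single pass using a resettable accumulator: a marker line clears everything collected so far, and the kept lines are reversed at the end; no break/truncation step exists.
import Mathlib
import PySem

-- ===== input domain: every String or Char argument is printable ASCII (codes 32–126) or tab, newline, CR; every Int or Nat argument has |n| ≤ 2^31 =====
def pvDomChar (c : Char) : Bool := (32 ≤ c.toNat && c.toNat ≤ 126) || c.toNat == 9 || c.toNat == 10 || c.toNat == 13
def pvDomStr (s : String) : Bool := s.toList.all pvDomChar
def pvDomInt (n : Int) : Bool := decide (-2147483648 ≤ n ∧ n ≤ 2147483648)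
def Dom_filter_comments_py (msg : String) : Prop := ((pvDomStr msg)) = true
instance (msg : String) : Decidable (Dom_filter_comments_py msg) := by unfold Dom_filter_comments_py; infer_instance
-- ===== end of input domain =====

-- B replaces A's left-to-right break-at-marker loop with a right-to-left pass whose
-- accumulator is reset by a marker line (alternative decomposition, same cost).

-- Python's msg.split("\n") (sep nonempty), shared by both ports; exact via PySem.Chars.splitOn.
def pvSplitNL (msg : String) : List String :=
  (PySem.Chars.splitOn msg.toList ['\n']).map String.ofList

-- ===== PORT A =====
-- A's for-loop with break: structural recursion over the split lines, same branch order.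
def pvALoop : List String → List String
  | [] => []
  | line :: rest =>
    if PySem.Str.isIn "# ------------------------ >8 ------------------------" line then []
    else if PySem.Str.startswith line "#" then pvALoop rest
    else line :: pvALoop rest

def filter_comments_py (msg : String) : String :=
  PySem.Str.join "\n" (pvALoop (pvSplitNL msg))

-- ===== PORT B =====
-- B's loop body: kept.clear() on a marker line, kept.append otherwise (unless a comment).
def pvBStep (kept : List String) (line : String) : List String :=
  if PySem.Str.isIn "# ------------------------ >8 ------------------------" line then []
  else if PySem.Str.startswith line "#" then kept
  else kept ++ [line]

def filter_comments_py_alt (msg : String) : String :=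
  let kept := ((pvSplitNL msg).reverse).foldl pvBStep []
  PySem.Str.join "\n" kept.reverse

-- ===== PRECONDITION & SPEC =====
def Spec_filter_comments_py (msg : String) (out : String) : Prop := out = filter_comments_py_alt msg
instance (msg : String) (out : String) : Decidable (Spec_filter_comments_py msg out) := by unfold Spec_filter_comments_py; infer_instance

-- ===== CLAIM (what is proved, stated in full; the proofs are below) =====
def Claim_equal_filter_comments_py : Prop := ∀ (msg : String), Dom_filter_comments_py msg → Spec_filter_comments_py msg (filter_comments_py msg)

-- ===== LEMMAS AND PROOFS =====
theorem pvBLoop_eq (ls : List String) :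
    (ls.reverse.foldl pvBStep []).reverse = pvALoop ls := by
  rw [List.foldl_reverse]
  induction ls with
  | nil => rfl
  | cons l rest ih =>
    simp only [List.foldr_cons, pvALoop]
    generalize hK : List.foldr (fun x y => pvBStep y x) [] rest = K at ih
    unfold pvBStep
    split_ifs with h h2 <;> simp [ih]

-- ===== VERDICT (by name: the statement is the Claim_ definition above) =====
theorem filter_comments_py_spec : Claim_equal_filter_comments_py := by
  intro msg _
  show PySem.Str.join "\n" (pvALoop (pvSplitNL msg)) =
    PySem.Str.join "\n" (((pvSplitNL msg).reverse.foldl pvBStep []).reverse)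
  rw [pvBLoop_eq]
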